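-- pv_equiv track=rewrite | github.com/FICTION-ZJU/DAINARX | src/Evaluation.py | max_min_abs_diff
-- ===== SOURCE A (Python) =====
-- import bisect
--
-- def max_min_abs_diff(a, b):
--     sorted_b = sorted(b)
--     max_diff = 0
--     for x in a:
--         pos = bisect.bisect_left(sorted_b, x)
--         if pos == 0:
--             diff = abs(sorted_b[0] - x)
--         elif pos == len(sorted_b):
--             diff = abs(sorted_b[-1] - x)
--         else:
--             left = sorted_b[pos - 1]
--             right = sorted_b[pos]
--             diff = min(abs(x - left), abs(x - right))
--         max_diff = max(max_diff, diff)
--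
--     return max_diff
-- ===== SOURCE B (Python) =====
-- def max_min_abs_diff(a, b):
--     max_diff = 0
--     for x in a:
--         diff = abs(b[0] - x)
--         for y in b[1:]:
--             diff = min(diff, abs(y - x))
--         max_diff = max(max_diff, diff)
--     return max_diff
-- ===== Notes on version B (the rewrite author's own statement) =====
-- stated objective: simpler
-- what changed: Replaces sort + binary search + neighbour case analysis by a plain nested scan that keeps a running minimum distance per element.
import Mathlib
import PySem

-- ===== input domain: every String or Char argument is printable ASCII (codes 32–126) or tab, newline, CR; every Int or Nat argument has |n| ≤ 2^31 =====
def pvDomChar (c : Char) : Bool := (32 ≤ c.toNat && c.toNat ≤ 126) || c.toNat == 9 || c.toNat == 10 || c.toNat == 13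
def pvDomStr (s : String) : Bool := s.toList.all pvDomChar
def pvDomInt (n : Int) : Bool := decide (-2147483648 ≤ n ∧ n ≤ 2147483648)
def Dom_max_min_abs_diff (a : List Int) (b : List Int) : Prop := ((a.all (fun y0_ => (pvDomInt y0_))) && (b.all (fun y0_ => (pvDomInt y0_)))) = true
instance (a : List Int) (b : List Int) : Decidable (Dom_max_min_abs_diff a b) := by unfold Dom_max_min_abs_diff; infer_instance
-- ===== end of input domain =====

-- B replaces A's sort + binary search + neighbour case analysis by a plain nested scan (simpler, no sorting).

-- ===== PORT A =====
-- loop body of A: diff for one x, given sorted_b (the `.getD 0` defaults are never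
-- reached under Pre_: the loop only runs when sorted_b is nonempty)
def pvDiffA (x : Int) (s : List Int) : Int :=
  if PySem.List.bisectLeft s x = 0 then
    |(PySem.List.pyGet? s 0).getD 0 - x|
  else if PySem.List.bisectLeft s x = s.length then
    |(PySem.List.pyGet? s (-1)).getD 0 - x|
  else
    min |x - (PySem.List.pyGet? s ((PySem.List.bisectLeft s x : Int) - 1)).getD 0|
        |x - (PySem.List.pyGet? s (PySem.List.bisectLeft s x : Int)).getD 0|

def max_min_abs_diff (a : List Int) (b : List Int) : Int :=
  let sorted_b := PySem.List.sorted b (fun y => y)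
  a.foldl (fun max_diff x => max max_diff (pvDiffA x sorted_b)) 0

-- ===== PORT B =====
-- inner loop of B: seed with abs(b[0]-x), then scan b[1:] (the `.getD 0` default is
-- never reached under Pre_)
def pvDiffB (x : Int) (b : List Int) : Int :=
  (PySem.List.slice b (some 1) none).foldl (fun diff y => min diff |y - x|)
    |(PySem.List.pyGet? b 0).getD 0 - x|

def max_min_abs_diff_alt (a : List Int) (b : List Int) : Int :=
  a.foldl (fun max_diff x => max max_diff (pvDiffB x b)) 0

-- ===== PRECONDITION & SPEC =====
-- Both A and B raise IndexError (b[0] / sorted_b[0]) when b is empty and a is not;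
-- Pre_ excludes exactly those inputs.
def Pre_max_min_abs_diff (a : List Int) (b : List Int) : Prop := b ≠ [] ∨ a = []
instance (a : List Int) (b : List Int) : Decidable (Pre_max_min_abs_diff a b) := by
  unfold Pre_max_min_abs_diff; infer_instance
def pvWitness_max_min_abs_diff : List Int × List Int := ([3, -1, 7], [0, 5])

def Spec_max_min_abs_diff (a : List Int) (b : List Int) (out : Int) : Prop := out = max_min_abs_diff_alt a b
instance (a : List Int) (b : List Int) (out : Int) : Decidable (Spec_max_min_abs_diff a b out) := by unfold Spec_max_min_abs_diff; infer_instance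

-- ===== CLAIM (what is proved, stated in full; the proofs are below) =====
def Claim_equal_max_min_abs_diff : Prop := ∀ (a : List Int) (b : List Int), Dom_max_min_abs_diff a b → Pre_max_min_abs_diff a b → Spec_max_min_abs_diff a b (max_min_abs_diff a b)

-- ===== LEMMAS AND PROOFS =====

-- "r is the minimal distance from x to an element of l"
def pvNN (x : Int) (l : List Int) (r : Int) : Prop :=
  (∃ y ∈ l, r = |y - x|) ∧ ∀ y ∈ l, r ≤ |y - x|

theorem pvNN_unique {x : Int} {l : List Int} {r r' : Int}
    (h1 : pvNN x l r) (h2 : pvNN x l r') : r = r' := by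
  obtain ⟨⟨y, hy, hr⟩, h1b⟩ := h1
  obtain ⟨⟨z, hz, hr'⟩, h2b⟩ := h2
  exact le_antisymm (hr' ▸ h1b z hz) (hr ▸ h2b y hy)

theorem pvNN_perm {x : Int} {l l' : List Int} {r : Int} (h : l.Perm l') :
    pvNN x l r ↔ pvNN x l' r := by
  unfold pvNN
  constructor <;> rintro ⟨⟨y, hy, hr⟩, hb⟩
  · exact ⟨⟨y, h.mem_iff.mp hy, hr⟩, fun z hz => hb z (h.mem_iff.mpr hz)⟩
  · exact ⟨⟨y, h.mem_iff.mpr hy, hr⟩, fun z hz => hb z (h.mem_iff.mp hz)⟩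

theorem pvFold_spec (x : Int) (l : List Int) : ∀ d0 : Int,
    l.foldl (fun d y => min d |y - x|) d0 ≤ d0 ∧
    (∀ y ∈ l, l.foldl (fun d y => min d |y - x|) d0 ≤ |y - x|) ∧
    (l.foldl (fun d y => min d |y - x|) d0 = d0 ∨
      ∃ y ∈ l, l.foldl (fun d y => min d |y - x|) d0 = |y - x|) := by
  induction l with
  | nil => intro d0; simp
  | cons z t ih =>
    intro d0
    obtain ⟨h1, h2, h3⟩ := ih (min d0 |z - x|)
    simp only [List.foldl_cons]
    refine ⟨le_trans h1 (min_le_left _ _), ?_, ?_⟩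
    · intro y hy
      rcases List.mem_cons.mp hy with rfl | hy
      · exact le_trans h1 (min_le_right _ _)
      · exact h2 y hy
    · rcases h3 with h3 | ⟨y, hy, hr⟩
      · rcases min_cases d0 |z - x| with ⟨he, _⟩ | ⟨he, _⟩
        · exact Or.inl (h3.trans he)
        · exact Or.inr ⟨z, List.mem_cons_self, h3.trans he⟩
      · exact Or.inr ⟨y, List.mem_cons_of_mem _ hy, hr⟩

theorem pvNN_B (x : Int) (b : List Int) (hb : b ≠ []) : pvNN x b (pvDiffB x b) := by
  obtain ⟨y, t, rfl⟩ := List.exists_cons_of_ne_nil hb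
  unfold pvDiffB
  rw [PySem.List.slice_from_one]
  simp only [PySem.List.pyGet?_zero_cons, Option.getD_some, List.tail_cons]
  obtain ⟨h1, h2, h3⟩ := pvFold_spec x t |y - x|
  constructor
  · rcases h3 with h3 | ⟨z, hz, hr⟩
    · exact ⟨y, List.mem_cons_self, h3⟩
    · exact ⟨z, List.mem_cons_of_mem _ hz, hr⟩
  · intro z hz
    rcases List.mem_cons.mp hz with rfl | hz
    · exact h1
    · exact h2 z hz

theorem pvNN_A (x : Int) (s : List Int) (hs : s.Pairwise (· ≤ ·)) (hne : s ≠ []) :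
    pvNN x s (pvDiffA x s) := by
  obtain ⟨hposle, hlt, hge⟩ := PySem.List.bisectLeft_spec s x hs
  have hlen : 0 < s.length := List.length_pos_iff.mpr hne
  have mono : ∀ (i j : ℕ) (hi : i < s.length) (hj : j < s.length), i ≤ j → s[i] ≤ s[j] := by
    intro i j hi hj hij
    rcases Nat.lt_or_ge i j with h | h
    · exact (List.pairwise_iff_getElem.mp hs) i j hi hj h
    · have : i = j := le_antisymm hij h
      subst this; exact le_refl _
  unfold pvDiffA
  by_cases hp0 : PySem.List.bisectLeft s x = 0
  · rw [if_pos hp0]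
    rw [PySem.List.pyGet?_zero, List.getElem?_eq_getElem hlen, Option.getD_some]
    have hx0 : x ≤ s[0] := hge 0 hlen (by omega)
    constructor
    · exact ⟨s[0], List.getElem_mem hlen, rfl⟩
    · intro y hy
      obtain ⟨j, hj, rfl⟩ := List.mem_iff_getElem.mp hy
      have hxj : x ≤ s[j] := hge j hj (by omega)
      have h0j : s[0] ≤ s[j] := mono 0 j hlen hj (Nat.zero_le _)
      rw [abs_of_nonneg (by omega), abs_of_nonneg (by omega)]
      omega
  · by_cases hpl : PySem.List.bisectLeft s x = s.length
    · rw [if_neg hp0, if_pos hpl]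
      have hlast : s.length - 1 < s.length := by omega
      rw [PySem.List.pyGet?_neg_one, List.getLast?_eq_getElem?,
        List.getElem?_eq_getElem hlast, Option.getD_some]
      have hxl : s[s.length - 1] < x := hlt (s.length - 1) hlast (by omega)
      constructor
      · exact ⟨s[s.length - 1], List.getElem_mem hlast, rfl⟩
      · intro y hy
        obtain ⟨j, hj, rfl⟩ := List.mem_iff_getElem.mp hy
        have hxj : s[j] < x := hlt j hj (by omega)
        have hjl : s[j] ≤ s[s.length - 1] := mono j (s.length - 1) hj hlast (by omega)
        rw [abs_of_nonpos (by omega), abs_of_nonpos (by omega)]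
        omega
    · rw [if_neg hp0, if_neg hpl]
      have hppos : 0 < PySem.List.bisectLeft s x := Nat.pos_of_ne_zero hp0
      have hplt : PySem.List.bisectLeft s x < s.length := lt_of_le_of_ne hposle hpl
      have hcast : (PySem.List.bisectLeft s x : Int) - 1
          = ((PySem.List.bisectLeft s x - 1 : ℕ) : Int) := by omega
      have hm1 : PySem.List.bisectLeft s x - 1 < s.length := by omega
      rw [hcast, PySem.List.pyGet?_natCast, PySem.List.pyGet?_natCast,
        List.getElem?_eq_getElem hm1, List.getElem?_eq_getElem hplt,
        Option.getD_some, Option.getD_some]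
      have hleft : s[PySem.List.bisectLeft s x - 1] < x := hlt _ hm1 (by omega)
      have hright : x ≤ s[PySem.List.bisectLeft s x] := hge _ hplt (by omega)
      constructor
      · rcases min_cases |x - s[PySem.List.bisectLeft s x - 1]|
            |x - s[PySem.List.bisectLeft s x]| with ⟨he, _⟩ | ⟨he, _⟩
        · exact ⟨s[PySem.List.bisectLeft s x - 1], List.getElem_mem hm1,
            by rw [he, abs_sub_comm]⟩
        · exact ⟨s[PySem.List.bisectLeft s x], List.getElem_mem hplt,
            by rw [he, abs_sub_comm]⟩
      · intro y hy
        obtain ⟨j, hj, rfl⟩ := List.mem_iff_getElem.mp hy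
        rcases Nat.lt_or_ge j (PySem.List.bisectLeft s x) with hcase | hcase
        · have hxj : s[j] < x := hlt j hj hcase
          have hjl : s[j] ≤ s[PySem.List.bisectLeft s x - 1] := mono j _ hj hm1 (by omega)
          refine le_trans (min_le_left _ _) ?_
          rw [abs_of_nonneg (by omega), abs_of_nonpos (by omega)]
          omega
        · have hxj : x ≤ s[j] := hge j hj hcase
          have hjl : s[PySem.List.bisectLeft s x] ≤ s[j] := mono _ j hplt hj hcase
          refine le_trans (min_le_right _ _) ?_
          rw [abs_of_nonpos (by omega), abs_of_nonneg (by omega)]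
          omega

theorem pvDiff_eq (x : Int) (b : List Int) (hb : b ≠ []) :
    pvDiffA x (PySem.List.sorted b (fun y => y)) = pvDiffB x b := by
  have hperm : (PySem.List.sorted b (fun y => y)).Perm b :=
    PySem.List.sorted_perm b (fun y => y) false
  have hsne : PySem.List.sorted b (fun y => y) ≠ [] := by
    intro h
    exact hb (List.Perm.eq_nil (h ▸ hperm.symm))
  have hA := pvNN_A x _ (PySem.List.sorted_pairwise b (fun y => y)) hsne
  exact pvNN_unique ((pvNN_perm hperm).mp hA) (pvNN_B x b hb)

-- ===== VERDICT (by name: the statement is the Claim_ definition above) =====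
theorem max_min_abs_diff_spec : Claim_equal_max_min_abs_diff := by
  intro a b _ hpre
  unfold Spec_max_min_abs_diff max_min_abs_diff max_min_abs_diff_alt
  rcases hpre with hb | ha
  · have : (fun max_diff x => max max_diff (pvDiffA x (PySem.List.sorted b (fun y => y))))
        = (fun max_diff x => max max_diff (pvDiffB x b)) := by
      funext md x
      rw [pvDiff_eq x b hb]
    simp only [this]
  · subst ha; simp
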